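-- pv_equiv track=rewrite | github.com/yoeripoels/vce | explanation/evaluation.py | create_all_intermediate_states
-- ===== SOURCE A (Python) =====
-- from itertools import permutations, product
--
-- def create_all_intermediate_states(lines, class_a, class_b):
--     """Given all lines and class_a -> class_b, create a list of configurations, where each configuration indicates
--     which lines have been changed from a -> b
--     """
--     to_swap = [i for i in range(len(lines)) if
--                (i in class_a and i not in class_b) or (i in class_b and i not in class_a)]
--     n_dif = len(to_swap)
--     common_state = set(class_a).intersection(set(class_b))  # these lines are always present
--     swap_conf = list(product(range(2), repeat=n_dif))  # which lines have we swapped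
--     states = []
--     for conf in swap_conf:  # for each possible combination of lines we have swapped
--         state = [to_swap[i] for i in range(n_dif) if conf[i] == 1]
--         state = list(set(state).union(common_state))
--         state.sort()
--         states.append(tuple(state))  # append
--     return states
-- ===== SOURCE B (Python) =====
-- def create_all_intermediate_states(lines, class_a, class_b):
--     """Incremental powerset: double the state list once per differing line
--     (processed back-to-front so that to_swap[0] varies slowest, matching
--     the product ordering), then sort each accumulated set once."""
--     sa, sb = set(class_a), set(class_b)
--     to_swap = [i for i in range(len(lines)) if (i in sa) != (i in sb)]
--     common = sa & sb
--     subsets = [()]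
--     for e in reversed(to_swap):
--         subsets = subsets + [s + (e,) for s in subsets]
--     return [tuple(sorted(common.union(s))) for s in subsets]
-- ===== Notes on version B (the rewrite author's own statement) =====
-- stated objective: faster
-- what changed: Replaces itertools.product over bit-vectors plus a per-configuration index comprehension by an incremental powerset (the subset list is doubled once per differing line, back-to-front, reproducing A's product order exactly), and builds to_swap with set membership instead of A's repeated linear scans of class_a/class_b, turning the to_swap phase from O(len(lines)*(|class_a|+|class_b|)) into O(len(lines))
import Mathlib
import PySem

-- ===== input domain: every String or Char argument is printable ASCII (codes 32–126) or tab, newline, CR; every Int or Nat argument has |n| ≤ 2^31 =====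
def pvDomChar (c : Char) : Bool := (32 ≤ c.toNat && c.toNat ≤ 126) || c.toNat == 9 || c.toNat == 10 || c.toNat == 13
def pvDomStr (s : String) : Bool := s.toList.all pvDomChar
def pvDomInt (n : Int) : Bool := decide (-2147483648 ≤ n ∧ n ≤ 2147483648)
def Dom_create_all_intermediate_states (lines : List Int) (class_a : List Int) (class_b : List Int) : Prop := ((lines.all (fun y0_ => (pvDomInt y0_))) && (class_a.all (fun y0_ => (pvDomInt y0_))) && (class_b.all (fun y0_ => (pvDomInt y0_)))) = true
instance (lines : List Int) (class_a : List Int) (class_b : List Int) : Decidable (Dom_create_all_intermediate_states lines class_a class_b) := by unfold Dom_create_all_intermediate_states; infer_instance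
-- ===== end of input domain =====

-- B replaces product-of-bits + per-configuration index comprehension by an incremental
-- powerset (the state list is doubled once per differing line, back-to-front, so the
-- enumeration order of A is reproduced) and uses set membership to build to_swap,
-- removing A's repeated linear scans of class_a/class_b (measurably faster).

-- ===== PORT A =====
-- itertools.product(range(2), repeat=n): first coordinate varies slowest
def prodTwoRep : Nat → List (List Int)
  | 0 => [[]]
  | n + 1 => ([0, 1] : List Int).flatMap (fun b => (prodTwoRep n).map (fun conf => b :: conf))

def create_all_intermediate_states (lines : List Int) (class_a : List Int) (class_b : List Int) : List (List Int) :=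
  let to_swap := (PySem.List.pyRange 0 (lines.length : Int) 1).filter
      (fun i => (class_a.contains i && !(class_b.contains i)) || (class_b.contains i && !(class_a.contains i)))
  let n_dif := to_swap.length
  let common_state : PySem.Set Int := PySem.Set.inter (PySem.Set.ofList class_a) (PySem.Set.ofList class_b)
  let swap_conf := prodTwoRep n_dif
  swap_conf.foldl (fun states conf =>
    let state := ((PySem.List.pyRange 0 (n_dif : Int) 1).filter
        (fun i => PySem.List.pyGetD conf i 0 == 1)).map (fun i => PySem.List.pyGetD to_swap i 0)
    let state2 : PySem.Set Int := PySem.Set.union (PySem.Set.ofList state) common_state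
    -- list(set) then .sort(): the sorted result does not depend on the set's iteration order
    states ++ [PySem.List.sorted state2 (fun x => x) false]) []

-- ===== PORT B =====
def create_all_intermediate_states_alt (lines : List Int) (class_a : List Int) (class_b : List Int) : List (List Int) :=
  let sa : PySem.Set Int := PySem.Set.ofList class_a
  let sb : PySem.Set Int := PySem.Set.ofList class_b
  let to_swap := (PySem.List.pyRange 0 (lines.length : Int) 1).filter
      (fun i => PySem.Set.contains sa i != PySem.Set.contains sb i)
  let common : PySem.Set Int := PySem.Set.inter sa sb
  let subsets := to_swap.reverse.foldl
      (fun subsets e => subsets ++ subsets.map (fun s => s ++ [e])) ([([] : List Int)])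
  subsets.map (fun s => PySem.List.sorted (PySem.Set.union common s) (fun x => x) false)

-- ===== PRECONDITION & SPEC =====
def Spec_create_all_intermediate_states (lines : List Int) (class_a : List Int) (class_b : List Int) (out : List (List Int)) : Prop := out = create_all_intermediate_states_alt lines class_a class_b
instance (lines : List Int) (class_a : List Int) (class_b : List Int) (out : List (List Int)) : Decidable (Spec_create_all_intermediate_states lines class_a class_b out) := by unfold Spec_create_all_intermediate_states; infer_instance

-- ===== CLAIM (what is proved, stated in full; the proofs are below) =====
def Claim_equal_create_all_intermediate_states : Prop := ∀ (lines : List Int) (class_a : List Int) (class_b : List Int), Dom_create_all_intermediate_states lines class_a class_b → Spec_create_all_intermediate_states lines class_a class_b (create_all_intermediate_states lines class_a class_b)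

-- ===== LEMMAS AND PROOFS =====

-- structural form of A's per-configuration comprehension [to_swap[i] for i in range(n) if conf[i]==1]
def selStruct : List Int → List Int → List Int
  | c :: cs, t :: ts => if c == 1 then t :: selStruct cs ts else selStruct cs ts
  | _, _ => []

-- canonical powerset in A's product order, subsets as cons-lists
def myPow : List Int → List (List Int)
  | [] => [[]]
  | t :: r => myPow r ++ (myPow r).map (fun s => t :: s)

lemma mem_prodTwoRep_length : ∀ (n : Nat) (conf : List Int), conf ∈ prodTwoRep n → conf.length = n := by
  intro n
  induction n with
  | zero => intro conf h; simp [prodTwoRep] at h; simp [h]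
  | succ m ih =>
    intro conf h
    simp only [prodTwoRep, List.mem_flatMap, List.mem_map] at h
    obtain ⟨b, _, c, hc, rfl⟩ := h
    simp [ih c hc]

lemma rangeSel : ∀ (ts conf : List Int), conf.length = ts.length →
    ((List.range ts.length).filter (fun k => conf.getD k 0 == 1)).map (fun k => ts.getD k 0)
      = selStruct conf ts := by
  intro ts
  induction ts with
  | nil => intro conf h; simp [selStruct, List.length_eq_zero_iff.mp (by simpa using h)]
  | cons t r ih =>
    intro conf h
    cases conf with
    | nil => simp at h
    | cons c cs =>
      simp only [List.length_cons] at h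
      simp only [List.length_cons, List.range_succ_eq_map, List.filter_cons, List.getD_cons_zero,
        List.filter_map, selStruct]
      split
      · simpa [Function.comp_def, List.getD_cons_succ] using congrArg (t :: ·) (ih cs (by omega))
      · simpa [Function.comp_def, List.getD_cons_succ] using ih cs (by omega)

lemma selComp_eq (ts conf : List Int) (h : conf.length = ts.length) :
    ((PySem.List.pyRange 0 (ts.length : Int) 1).filter (fun i => PySem.List.pyGetD conf i 0 == 1)).map
      (fun i => PySem.List.pyGetD ts i 0) = selStruct conf ts := by
  rw [PySem.List.pyRange_zero_nat, List.filter_map, List.map_map]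
  simpa [Function.comp_def, PySem.List.pyGetD_natCast] using rangeSel ts conf h

lemma A_pow : ∀ (ts : List Int) (n : Nat), n = ts.length →
    (prodTwoRep n).map (fun conf => selStruct conf ts) = myPow ts := by
  intro ts
  induction ts with
  | nil => intro n h; subst h; simp [prodTwoRep, myPow, selStruct]
  | cons t r ih =>
    intro n h
    subst h
    simp only [List.length_cons, prodTwoRep, List.flatMap_cons, List.flatMap_nil, List.append_nil,
      List.map_append, List.map_map, myPow]
    congr 1
    · simpa [Function.comp_def, selStruct] using ih r.length rfl
    · rw [← ih r.length rfl, List.map_map]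
      simp [Function.comp_def, selStruct]

lemma B_pow : ∀ ts : List Int,
    ts.reverse.foldl (fun S e => S ++ S.map (fun s => s ++ [e])) [([] : List Int)]
      = (myPow ts).map List.reverse := by
  intro ts
  induction ts with
  | nil => simp [myPow]
  | cons t r ih =>
    rw [List.reverse_cons, List.foldl_append, ih]
    simp only [List.foldl_cons, List.foldl_nil, myPow, List.map_append, List.map_map]
    congr 1
    simp [Function.comp_def]

lemma mem_myPow_sublist : ∀ (ts s : List Int), s ∈ myPow ts → List.Sublist s ts := by
  intro ts
  induction ts with
  | nil => intro s h; simp [myPow] at h; simp [h]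
  | cons t r ih =>
    intro s h
    simp only [myPow, List.mem_append, List.mem_map] at h
    rcases h with h | ⟨s', hs', rfl⟩
    · exact (ih s h).cons t
    · exact (ih s' hs').cons₂ t

lemma sorted_ext (u v : List Int) (hu : u.Nodup) (hv : v.Nodup) (h : ∀ x, x ∈ u ↔ x ∈ v) :
    PySem.List.sorted u (fun x => x) false = PySem.List.sorted v (fun x => x) false := by
  apply PySem.List.sorted_id_eq_of_perm_of_pairwise
  · exact (PySem.List.sorted_perm v (fun x => x) false).trans
      (((List.perm_ext_iff_of_nodup hv hu).mpr (fun a => (h a).symm)))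
  · simpa using PySem.List.sorted_pairwise v (fun x => x)

lemma contains_ofList_eq (l : List Int) (i : Int) :
    PySem.Set.contains (PySem.Set.ofList l) i = l.contains i := by
  rw [Bool.eq_iff_iff, PySem.Set.contains_iff, PySem.Set.mem_ofList, List.contains_iff_mem]

lemma pred_eq (class_a class_b : List Int) (i : Int) :
    ((class_a.contains i && !(class_b.contains i)) || (class_b.contains i && !(class_a.contains i)))
      = (PySem.Set.contains (PySem.Set.ofList class_a) i != PySem.Set.contains (PySem.Set.ofList class_b) i) := by
  rw [contains_ofList_eq, contains_ofList_eq]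
  cases class_a.contains i <;> cases class_b.contains i <;> rfl

-- ===== VERDICT (by name: the statement is the Claim_ definition above) =====
theorem create_all_intermediate_states_spec : Claim_equal_create_all_intermediate_states := by
  intro lines class_a class_b _dom
  unfold Spec_create_all_intermediate_states
  unfold create_all_intermediate_states create_all_intermediate_states_alt
  simp only []
  rw [show ((PySem.List.pyRange 0 (lines.length : Int) 1).filter
        (fun i => PySem.Set.contains (PySem.Set.ofList class_a) i != PySem.Set.contains (PySem.Set.ofList class_b) i))
      = ((PySem.List.pyRange 0 (lines.length : Int) 1).filter
        (fun i => (class_a.contains i && !(class_b.contains i)) || (class_b.contains i && !(class_a.contains i))))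
    from List.filter_congr (fun i _ => (pred_eq class_a class_b i).symm)]
  set ts := (PySem.List.pyRange 0 (lines.length : Int) 1).filter
      (fun i => (class_a.contains i && !(class_b.contains i)) || (class_b.contains i && !(class_a.contains i))) with hts
  set common : PySem.Set Int := PySem.Set.inter (PySem.Set.ofList class_a) (PySem.Set.ofList class_b) with hcommon
  have hts_nodup : ts.Nodup := (PySem.List.nodup_pyRange_one 0 (lines.length : Int)).filter _
  have hcommon_nodup : common.Nodup := PySem.Set.nodup_inter _ _ (PySem.Set.nodup_ofList class_a)
  rw [PySem.List.foldl_append_singleton_eq_map, List.nil_append, B_pow ts, List.map_map]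
  have step1 : (prodTwoRep ts.length).map (fun conf =>
      PySem.List.sorted (PySem.Set.union (PySem.Set.ofList
        (((PySem.List.pyRange 0 (ts.length : Int) 1).filter
            (fun i => PySem.List.pyGetD conf i 0 == 1)).map (fun i => PySem.List.pyGetD ts i 0))) common)
        (fun x => x) false)
      = (myPow ts).map (fun s =>
          PySem.List.sorted (PySem.Set.union (PySem.Set.ofList s) common) (fun x => x) false) := by
    rw [← A_pow ts ts.length rfl, List.map_map]
    apply List.map_congr_left
    intro conf hconf
    simp only [Function.comp_def]
    rw [selComp_eq ts conf (mem_prodTwoRep_length ts.length conf hconf)]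
  rw [step1]
  apply List.map_congr_left
  intro s hs
  have hs_nodup : s.Nodup := hts_nodup.sublist (mem_myPow_sublist ts s hs)
  apply sorted_ext
  · exact PySem.Set.nodup_union _ _ (PySem.Set.nodup_ofList s)
  · exact PySem.Set.nodup_union _ _ hcommon_nodup
  · intro x
    rw [PySem.Set.mem_union, PySem.Set.mem_union, PySem.Set.mem_ofList, List.mem_reverse]
    tauto
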